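-- pv_equiv track=rewrite | github.com/jameschengpeng/k-Markovian | tool_box.py | check_trajectory
-- ===== SOURCE A (Python) =====
-- def check_trajectory(trajectory, n_explored):
--     # visited n_explored number of distinct cafes
--     if len(set(trajectory)) != n_explored:
--         return False
--     # check cases like: you visit cafe 2 before cafe 1
--     current_max = -1
--     for c in trajectory:
--         if c > current_max + 1:
--             return False
--         if c == current_max + 1:
--             current_max = c
--     return True
-- ===== SOURCE B (Python) =====
-- def check_trajectory(trajectory, n_explored):
--     # first-occurrence table: value -> index of its first appearance
--     first = {}
--     for i, c in enumerate(trajectory):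
--         if c not in first:
--             first[c] = i
--     if len(first) != n_explored:
--         return False
--     # every cafe v >= 1 must have cafe v-1 first visited strictly earlier
--     for v, idx in first.items():
--         if v >= 1:
--             j = first.get(v - 1)
--             if j is None or j >= idx:
--                 return False
--     return True
-- ===== Notes on version B (the rewrite author's own statement) =====
-- stated objective: alternative
-- what changed: B replaces A's running current_max scan by a first-occurrence index table built in one pass, then checks the distinct count and that every cafe v>=1 has cafe v-1 first visited strictly earlier.
import Mathlib
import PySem

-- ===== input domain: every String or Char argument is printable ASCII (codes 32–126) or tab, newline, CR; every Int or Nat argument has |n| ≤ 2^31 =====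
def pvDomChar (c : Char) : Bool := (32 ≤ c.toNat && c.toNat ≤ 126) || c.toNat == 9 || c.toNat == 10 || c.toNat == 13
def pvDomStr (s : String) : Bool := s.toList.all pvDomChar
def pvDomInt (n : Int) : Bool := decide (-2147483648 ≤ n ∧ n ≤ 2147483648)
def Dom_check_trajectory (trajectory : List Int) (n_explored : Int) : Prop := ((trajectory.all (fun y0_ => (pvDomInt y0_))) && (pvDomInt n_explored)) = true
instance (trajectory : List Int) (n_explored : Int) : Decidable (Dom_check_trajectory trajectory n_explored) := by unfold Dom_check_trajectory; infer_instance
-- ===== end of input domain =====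

-- B (alternative, same cost): instead of A's running current_max scan, B builds a
-- first-occurrence index table in one pass and checks that every cafe v ≥ 1 has
-- cafe v-1 first visited strictly earlier; the distinct count is the table's size.

-- ===== PORT A =====
-- the 'for c in trajectory' loop with state current_max; returns False early on c > current_max + 1
def ctLoopA : List Int → Int → Bool
  | [], _ => true
  | c :: rest, current_max =>
      if c > current_max + 1 then false
      else if c == current_max + 1 then ctLoopA rest c
      else ctLoopA rest current_max

def check_trajectory (trajectory : List Int) (n_explored : Int) : Bool :=
  if ((PySem.Set.ofList trajectory).length : Int) ≠ n_explored then false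
  else ctLoopA trajectory (-1)

-- ===== PORT B =====
-- 'for i, c in enumerate(trajectory): if c not in first: first[c] = i'
def foStep (d : PySem.Dict Int Int) (p : Int × Int) : PySem.Dict Int Int :=
  if d.contains p.2 then d else d.insert p.2 p.1

def firstOcc (trajectory : List Int) : PySem.Dict Int Int :=
  (PySem.List.enumerate trajectory).foldl foStep PySem.Dict.empty

def check_trajectory_alt (trajectory : List Int) (n_explored : Int) : Bool :=
  let first := firstOcc trajectory
  if ((first.size : Int) ≠ n_explored) then false
  else
    -- 'for v, idx in first.items(): if v >= 1: j = first.get(v-1); if j is None or j >= idx: return False'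
    first.items.all (fun vi =>
      if 1 ≤ vi.1 then
        match first.get? (vi.1 - 1) with
        | none => false
        | some j => decide (j < vi.2)
      else true)

-- ===== PRECONDITION & SPEC =====
def Spec_check_trajectory (trajectory : List Int) (n_explored : Int) (out : Bool) : Prop := out = check_trajectory_alt trajectory n_explored
instance (trajectory : List Int) (n_explored : Int) (out : Bool) : Decidable (Spec_check_trajectory trajectory n_explored out) := by unfold Spec_check_trajectory; infer_instance

-- ===== CLAIM (what is proved, stated in full; the proofs are below) =====
def Claim_equal_check_trajectory : Prop := ∀ (trajectory : List Int) (n_explored : Int), Dom_check_trajectory trajectory n_explored → Spec_check_trajectory trajectory n_explored (check_trajectory trajectory n_explored)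

-- ===== LEMMAS AND PROOFS =====

-- keys of the first-occurrence fold = ordered dedup (Python set order of first insertion)
theorem keys_foldl_foStep (l : List Int) (s : Int) (d : PySem.Dict Int Int) :
    ((PySem.List.enumerate l s).foldl foStep d).keys = PySem.Set.update d.keys l := by
  induction l generalizing s d with
  | nil => simp [PySem.List.enumerate_nil, PySem.Set.update]
  | cons c rest ih =>
      rw [PySem.List.enumerate_cons, List.foldl_cons, ih]
      show _ = (c :: rest).foldl PySem.Set.add d.keys
      rw [List.foldl_cons]
      congr 1
      unfold foStep
      by_cases h : d.contains c = true
      · simp only [h, if_pos]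
        rw [PySem.Set.add_of_mem ((PySem.Dict.contains_iff_mem_keys d c).mp h)]
      · rw [if_neg (by simp [h]), PySem.Dict.keys_insert_of_not_contains d (k := c) s (by simp [h]),
          PySem.Set.add_of_not_mem (fun hm => h ((PySem.Dict.contains_iff_mem_keys d c).mpr hm))]

theorem keys_firstOcc (t : List Int) : (firstOcc t).keys = PySem.Set.ofList t := by
  rw [firstOcc, keys_foldl_foStep]
  simp [PySem.Set.update, PySem.Set.ofList_eq_foldl, PySem.Dict.keys_empty]

theorem nodup_keys_firstOcc (t : List Int) : (firstOcc t).keys.Nodup := by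
  rw [keys_firstOcc]; exact PySem.Set.nodup_ofList t

-- get? of the first-occurrence fold = accumulator's entry, else first index in l offset by s
theorem get?_foldl_foStep (l : List Int) (s : Int) (d : PySem.Dict Int Int) (v : Int) :
    ((PySem.List.enumerate l s).foldl foStep d).get? v
      = (d.get? v).or ((List.idxOf? v l).map (fun k => s + (k : Int))) := by
  induction l generalizing s d with
  | nil => simp [PySem.List.enumerate_nil]
  | cons c rest ih =>
      rw [PySem.List.enumerate_cons, List.foldl_cons, ih]
      by_cases hv : v = c
      · subst hv
        cases hd : d.get? v with
        | some j =>
            have hc : d.contains v = true := by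
              rw [PySem.Dict.contains_eq_isSome_get?, hd]; rfl
            simp [foStep, hc, hd]
        | none =>
            have hc : d.contains v = false := by
              rw [PySem.Dict.contains_eq_isSome_get?, hd]; rfl
            simp [foStep, hc, PySem.Dict.get?_insert_self, List.idxOf?_cons]
      · have hstep : (foStep d (s, c)).get? v = d.get? v := by
          unfold foStep
          by_cases hc : d.contains c = true
          · simp [hc]
          · simp only [hc, Bool.false_eq_true, if_false]
            exact PySem.Dict.get?_insert_of_ne d s hv
        rw [hstep]
        congr 1
        rw [List.idxOf?_cons, if_neg (by simp; exact fun h => hv h.symm)]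
        cases h : List.idxOf? v rest
        · simp
        · simp; omega

theorem get?_firstOcc (t : List Int) (v : Int) :
    (firstOcc t).get? v = Option.map (fun k : Nat => (k : Int)) (List.idxOf? v t) := by
  rw [firstOcc, get?_foldl_foStep]
  simp only [PySem.Dict.get?_empty, Option.none_or]
  cases List.idxOf? v t <;> simp

-- the order conditions, in element-wise form
def P1 (l : List Int) : Prop := ∀ i (h : i < l.length), l[i] ≤ ((l.take i).foldl max (-1)) + 1
def P2 (l : List Int) : Prop := ∀ i (h : i < l.length), 1 ≤ l[i] → (l[i] - 1) ∈ l.take i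

-- A's loop returns true iff every element exceeds the running max of its prefix by at most 1
theorem ctLoopA_char (l : List Int) (cm : Int) :
    ctLoopA l cm = true ↔ ∀ i (h : i < l.length), l[i] ≤ ((l.take i).foldl max cm) + 1 := by
  induction l generalizing cm with
  | nil => simp [ctLoopA]
  | cons c rest ih =>
      by_cases hc : c > cm + 1
      · constructor
        · intro h; exact absurd h (by simp [ctLoopA, hc])
        · intro h
          have := h 0 (by simp)
          simp at this; omega
      · have hstep : ctLoopA (c :: rest) cm = ctLoopA rest (max cm c) := by
          simp only [ctLoopA]
          rw [if_neg (by omega)]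
          by_cases he : c = cm + 1
          · have hmax : max cm c = c := max_eq_right (by omega)
            rw [if_pos (by simp [he]), hmax]
          · have hmax : max cm c = cm := max_eq_left (by omega)
            rw [if_neg (by simp [he]), hmax]
        rw [hstep, ih (max cm c)]
        constructor
        · intro h i hi
          match i with
          | 0 => simpa using by omega
          | Nat.succ j =>
              have hj : j < rest.length := by simpa using hi
              have := h j hj
              simpa using this
        · intro h j hj
          have := h (j + 1) (by simpa using hj)
          simpa using this
  
-- under P1 the prefix contains every value from 0 up to its running max
theorem reach_of_P1 (l : List Int) (h : P1 l) :
    ∀ k : Int, 0 ≤ k → k ≤ l.foldl max (-1) → k ∈ l := by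
  induction l using List.reverseRecOn with
  | nil => intro k h0 h1; simp at h1; omega
  | append_singleton t c ih =>
      intro k h0 h1
      rw [List.foldl_append] at h1
      simp only [List.foldl_cons, List.foldl_nil] at h1
      have ht : P1 t := by
        intro i hi
        have := h i (by simp; omega)
        rwa [List.getElem_append_left hi, List.take_append_of_le_length (by omega)] at this
      have hc : c ≤ t.foldl max (-1) + 1 := by
        have := h t.length (by simp)
        rwa [List.getElem_concat_length rfl, List.take_left] at this
      by_cases hk : k ≤ t.foldl max (-1)
      · exact List.mem_append_left _ (ih ht k h0 hk)
      · have : k = c := by omega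
        subst this; simp
  
theorem P1_iff_P2 (l : List Int) : P1 l ↔ P2 l := by
  constructor
  · intro h i hi hv
    have hpre : P1 (l.take i) := by
      intro j hj
      have hji : j < i := by simp at hj; omega
      rw [List.getElem_take, List.take_take, min_eq_left (by omega)]
      exact h j (by omega)
    refine reach_of_P1 _ hpre (l[i] - 1) (by omega) ?_
    have := h i hi
    omega
  · intro h i hi
    by_cases hv : 1 ≤ l[i]
    · have hm := h i hi hv
      have := (PySem.List.le_foldl_max (l.take i) (-1)).2 _ hm
      omega
    · have := (PySem.List.le_foldl_max (l.take i) (-1)).1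
      omega

-- B's items scan is true iff P2
theorem alt_scan_char (t : List Int) :
    ((firstOcc t).items.all (fun vi =>
      if 1 ≤ vi.1 then
        match (firstOcc t).get? (vi.1 - 1) with
        | none => false
        | some j => decide (j < vi.2)
      else true) = true) ↔ P2 t := by
  rw [List.all_eq_true]
  constructor
  · intro hall i hi hv
    set v := t[i] with hvdef
    have hvmem : v ∈ t := List.getElem_mem hi
    obtain ⟨k, hk⟩ := Option.isSome_iff_exists.mp ((List.isSome_idxOf? ).mpr hvmem)
    obtain ⟨hklen, hkv, hkmin⟩ := List.idxOf?_eq_some_iff.mp hk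
    have hki : k ≤ i := by
      by_contra hgt
      exact hkmin i (by omega) hvdef.symm
    have hmem : (v, (k : Int)) ∈ (firstOcc t).items := by
      apply PySem.Dict.mem_items_of_get?_eq_some
      rw [get?_firstOcc, hk]; rfl
    have := hall _ hmem
    simp only [hv, if_pos] at this
    cases hg : (firstOcc t).get? (v - 1) with
    | none => rw [hg] at this; exact absurd this Bool.false_ne_true
    | some j =>
        rw [hg] at this
        replace this : j < (k : Int) := of_decide_eq_true this
        rw [get?_firstOcc] at hg
        cases hk' : List.idxOf? (v - 1) t with
        | none => rw [hk'] at hg; simp at hg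
        | some k' =>
            rw [hk'] at hg
            simp only [Option.map_some] at hg
            obtain ⟨hk'len, hk'v, _⟩ := List.idxOf?_eq_some_iff.mp hk'
            have hj : j = (k' : Int) := by injection hg with h'; omega
            have hk'k : k' < k := by omega
            have hk'i : k' < i := by omega
            have hmem' : (t.take i)[k']'(by simp; omega) ∈ t.take i := List.getElem_mem _
            rw [List.getElem_take] at hmem'
            rwa [hk'v] at hmem'
  · intro h2 vi hvi
    by_cases hv : 1 ≤ vi.1
    · simp only [hv, if_pos]
      have hget : (firstOcc t).get? vi.1 = some vi.2 :=
        ((PySem.Dict.get?_eq_some_iff_mem_items _ _ _ (nodup_keys_firstOcc t)).mpr hvi)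
      rw [get?_firstOcc] at hget
      cases hk : List.idxOf? vi.1 t with
      | none => rw [hk] at hget; simp at hget
      | some k =>
          rw [hk] at hget
          simp only [Option.map_some] at hget
          have hvi2 : vi.2 = (k : Int) := by injection hget with h'; omega
          obtain ⟨hklen, hkv, _⟩ := List.idxOf?_eq_some_iff.mp hk
          have hmemtake : (vi.1 - 1) ∈ t.take k := by
            have := h2 k hklen (by omega)
            rwa [hkv] at this
          obtain ⟨m, hmlt, hmv⟩ : ∃ m, ∃ hm : m < k, t[m]'(by omega) = vi.1 - 1 := by
            obtain ⟨m, hm, hval⟩ := List.getElem_of_mem hmemtake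
            rw [List.getElem_take] at hval
            exact ⟨m, by simp at hm; omega, hval⟩
          have hmem' : (vi.1 - 1) ∈ t := by
            rw [← hmv]; exact List.getElem_mem _
          obtain ⟨k', hk'⟩ := Option.isSome_iff_exists.mp ((List.isSome_idxOf?).mpr hmem')
          obtain ⟨hk'len, hk'v, hk'min⟩ := List.idxOf?_eq_some_iff.mp hk'
          have hk'm : k' ≤ m := by
            by_contra hgt
            exact hk'min m (by omega) hmv
          rw [get?_firstOcc, hk']
          simp only [Option.map_some]
          have : (k' : Int) < (k : Int) := by
            have : k' < k := by omega
            omega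
          rw [hvi2]
          simpa using this
    · simp [hv]

-- ===== VERDICT (by name: the statement is the Claim_ definition above) =====
theorem check_trajectory_spec : Claim_equal_check_trajectory := by
  intro t n _
  unfold Spec_check_trajectory check_trajectory check_trajectory_alt
  have hsize : ((firstOcc t).size : Int) = ((PySem.Set.ofList t).length : Int) := by
    have h : (firstOcc t).size = (PySem.Set.ofList t).length := by
      show (firstOcc t).items.length = _
      rw [← List.length_map (f := Prod.fst), ← PySem.Dict.keys, keys_firstOcc]
    exact_mod_cast h
  rw [← hsize]
  by_cases hn : (((firstOcc t).size : Int) ≠ n)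
  · rw [if_pos hn, if_pos hn]
  · rw [if_neg hn, if_neg hn]
    have key : ∀ a b : Bool, (a = true ↔ b = true) → a = b := by decide
    apply key
    rw [ctLoopA_char, alt_scan_char]
    exact P1_iff_P2 t
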